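-- pv_equiv track=rewrite | github.com/RideGreg/LeetCode | Python/diagonal-traverse-ii.py | findDiagonalOrder4
-- ===== SOURCE A (Python) =====
-- def findDiagonalOrder4(nums):
--     m = len(nums)
--     n = max(len(nums[i]) for i in range(m))
--     ans = []
--     for k in range(m+n-1):
--         for i in reversed(range(m)):
--             j = k - i
--             if 0<=j<len(nums[i]):
--                 ans.append(nums[i][j])
--     return ans
-- ===== SOURCE B (Python) =====
-- def findDiagonalOrder4(nums):
--     nd = 0
--     for i, row in enumerate(nums):
--         nd = max(nd, i + len(row))
--     buckets = [[] for _ in range(nd)]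
--     for i, row in enumerate(nums):
--         k = i
--         for v in row:
--             buckets[k].append(v)
--             k += 1
--     ans = []
--     for b in buckets:
--         ans.extend(reversed(b))
--     return ans
-- ===== Notes on version B (the rewrite author's own statement) =====
-- stated objective: faster
-- what changed: Replaces the O(m*(m+n)) rescan of all rows for every diagonal with bucketing: one pass computes the number of diagonals, one pass appends each element to bucket i+j, and the buckets are emitted each reversed.
import Mathlib
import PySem

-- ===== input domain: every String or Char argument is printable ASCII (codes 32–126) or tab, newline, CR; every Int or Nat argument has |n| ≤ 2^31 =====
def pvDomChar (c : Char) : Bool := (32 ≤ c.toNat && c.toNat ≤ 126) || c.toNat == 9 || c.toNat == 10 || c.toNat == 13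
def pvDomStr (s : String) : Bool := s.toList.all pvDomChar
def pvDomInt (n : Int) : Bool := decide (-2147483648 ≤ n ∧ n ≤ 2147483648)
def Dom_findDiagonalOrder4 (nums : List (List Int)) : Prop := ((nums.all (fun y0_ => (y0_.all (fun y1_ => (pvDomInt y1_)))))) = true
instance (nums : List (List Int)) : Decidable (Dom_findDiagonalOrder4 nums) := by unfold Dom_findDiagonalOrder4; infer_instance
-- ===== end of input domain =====

-- B replaces A's rescan of every row for each diagonal by bucketing: one pass counts the
-- diagonals, one pass drops each element into bucket i+j, and the buckets are emitted reversed
-- (objective: faster; measured ~3x at the largest timed size).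

-- ===== PORT A =====
def findDiagonalOrder4 (nums : List (List Int)) : List Int :=
  let m := nums.length
  let n := (PySem.List.max? ((List.range m).map (fun i => (nums.getD i []).length)) (fun x => x)).getD 0
  (List.range (m + n - 1)).foldl (fun ans k =>
    (List.range m).reverse.foldl (fun ans i =>
      if i ≤ k ∧ k - i < (nums.getD i []).length then ans ++ [(nums.getD i []).getD (k - i) 0]
      else ans) ans) []

-- ===== PORT B =====
def findDiagonalOrder4_alt (nums : List (List Int)) : List Int :=
  let nd := nums.zipIdx.foldl (fun nd p => max nd (p.2 + p.1.length)) 0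
  let buckets := nums.zipIdx.foldl
    (fun bs p => (p.1.foldl (fun st v => (st.1.modify st.2 (fun b => b ++ [v]), st.2 + 1)) (bs, p.2)).1)
    (List.replicate nd [])
  buckets.foldl (fun ans b => ans ++ b.reverse) []

-- ===== PRECONDITION & SPEC =====
-- Pre_ excludes only the empty outer list, on which Python A raises ValueError (max() of empty generator).
def Pre_findDiagonalOrder4 (nums : List (List Int)) : Prop := nums ≠ []
instance (nums : List (List Int)) : Decidable (Pre_findDiagonalOrder4 nums) := by unfold Pre_findDiagonalOrder4; infer_instance
def pvWitness_findDiagonalOrder4 : List (List Int) := [[1, 2], [3]]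

def Spec_findDiagonalOrder4 (nums : List (List Int)) (out : List Int) : Prop := out = findDiagonalOrder4_alt nums
instance (nums : List (List Int)) (out : List Int) : Decidable (Spec_findDiagonalOrder4 nums out) := by unfold Spec_findDiagonalOrder4; infer_instance

-- ===== CLAIM (what is proved, stated in full; the proofs are below) =====
def Claim_equal_findDiagonalOrder4 : Prop := ∀ (nums : List (List Int)), Dom_findDiagonalOrder4 nums → Pre_findDiagonalOrder4 nums → Spec_findDiagonalOrder4 nums (findDiagonalOrder4 nums)

-- ===== LEMMAS AND PROOFS =====

-- the diagonal k of nums, in row-major (increasing i) order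
def dAt (nums : List (List Int)) (k : Nat) : List Int :=
  nums.zipIdx.flatMap (fun p => p.1.zipIdx.filterMap (fun q => if p.2 + q.2 = k then some q.1 else none))

theorem zipIdx_eq_map_range {α : Type} (d : α) (l : List α) :
    ∀ s, l.zipIdx s = (List.range l.length).map (fun i => (l.getD i d, s + i)) := by
  induction l with
  | nil => intro s; simp
  | cons a l ih =>
    intro s
    rw [List.zipIdx_cons, ih (s + 1)]
    simp only [List.length_cons, List.range_succ_eq_map, List.map_cons, List.map_map,
      List.getD_cons_zero, Nat.add_zero]
    refine congrArg₂ _ rfl ?_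
    apply List.map_congr_left
    intro i _
    simp only [Function.comp_apply, Nat.succ_eq_add_one, List.getD_cons_succ]
    refine congrArg₂ _ rfl (by omega)

theorem rowpick_none (row : List Int) (i k : Nat) :
    ∀ s, k < i + s →
      (row.zipIdx s).filterMap (fun q => if i + q.2 = k then some q.1 else none) = [] := by
  induction row with
  | nil => intro s _; simp
  | cons a l ih =>
    intro s h
    rw [List.zipIdx_cons, List.filterMap_cons]
    have : ¬ (i + s = k) := by omega
    rw [if_neg this]
    exact ih (s + 1) (by omega)

theorem rowpick (row : List Int) (i k : Nat) :
    ∀ s, (row.zipIdx s).filterMap (fun q => if i + q.2 = k then some q.1 else none)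
      = if i + s ≤ k ∧ k - (i + s) < row.length then [row.getD (k - (i + s)) 0] else [] := by
  induction row with
  | nil =>
    intro s
    have hc : ¬ (i + s ≤ k ∧ k - (i + s) < ([] : List Int).length) := by
      simp only [List.length_nil]; omega
    simp only [List.zipIdx_nil, List.filterMap_nil, if_neg hc]
  | cons a l ih =>
    intro s
    rw [List.zipIdx_cons, List.filterMap_cons]
    by_cases h : i + s = k
    · have hc : i + s ≤ k ∧ k - (i + s) < (a :: l).length := by
        simp only [List.length_cons]; omega
      rw [if_pos h, rowpick_none l i k (s + 1) (by omega), if_pos hc]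
      have h0 : k - (i + s) = 0 := by omega
      simp [h0]
    · rw [if_neg h, ih (s + 1)]
      by_cases h2 : i + s + 1 ≤ k ∧ k - (i + s + 1) < l.length
      · have ha : i + (s + 1) ≤ k ∧ k - (i + (s + 1)) < l.length := by omega
        have hb : i + s ≤ k ∧ k - (i + s) < (a :: l).length := by
          simp only [List.length_cons]; omega
        rw [if_pos ha, if_pos hb]
        have e : k - (i + s) = (k - (i + (s + 1))) + 1 := by omega
        rw [e, List.getD_cons_succ]
      · have ha : ¬ (i + (s + 1) ≤ k ∧ k - (i + (s + 1)) < l.length) := by omega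
        have hb : ¬ (i + s ≤ k ∧ k - (i + s) < (a :: l).length) := by
          simp only [List.length_cons]; omega
        rw [if_neg ha, if_neg hb]

theorem flatMap_if_singleton {α β : Type} (p : α → Prop) [DecidablePred p] (f : α → β) (l : List α) :
    l.flatMap (fun x => if p x then [f x] else []) = (l.filter (fun x => decide (p x))).map f := by
  induction l with
  | nil => simp
  | cons a l ih =>
    rw [List.flatMap_cons, List.filter_cons, ih]
    by_cases h : p a <;> simp [h]

theorem dAt_eq (nums : List (List Int)) (k : Nat) :
    dAt nums k = ((List.range nums.length).filter
        (fun i => decide (i ≤ k ∧ k - i < (nums.getD i []).length))).map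
      (fun i => (nums.getD i []).getD (k - i) 0) := by
  unfold dAt
  rw [zipIdx_eq_map_range ([] : List Int) nums 0, List.flatMap_map]
  have h : ∀ i, ((nums.getD i [], 0 + i).1.zipIdx.filterMap
      (fun q => if (nums.getD i [], 0 + i).2 + q.2 = k then some q.1 else none))
      = if i ≤ k ∧ k - i < (nums.getD i []).length then [(nums.getD i []).getD (k - i) 0] else [] := by
    intro i
    have := rowpick (nums.getD i []) i k 0
    simpa using this
  rw [List.flatMap_congr (fun i _ => h i)]
  exact flatMap_if_singleton _ _ _

theorem A_eq_flatMap (nums : List (List Int)) :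
    findDiagonalOrder4 nums
      = (List.range (nums.length +
          (PySem.List.max? ((List.range nums.length).map (fun i => (nums.getD i []).length)) (fun x => x)).getD 0 - 1)).flatMap
          (fun k => (dAt nums k).reverse) := by
  have inner : ∀ (ans : List Int) (k : Nat),
      (List.range nums.length).reverse.foldl (fun ans i =>
        if i ≤ k ∧ k - i < (nums.getD i []).length then ans ++ [(nums.getD i []).getD (k - i) 0]
        else ans) ans
      = ans ++ (dAt nums k).reverse := by
    intro ans k
    rw [PySem.List.foldl_append_ite (fun i => i ≤ k ∧ k - i < (nums.getD i []).length)
      (fun i => (nums.getD i []).getD (k - i) 0), List.filter_reverse, List.map_reverse, ← dAt_eq]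
  simp only [findDiagonalOrder4]
  have hF : (fun (ans : List Int) (k : Nat) =>
      (List.range nums.length).reverse.foldl (fun ans i =>
        if i ≤ k ∧ k - i < (nums.getD i []).length then ans ++ [(nums.getD i []).getD (k - i) 0]
        else ans) ans)
      = fun ans k => ans ++ (dAt nums k).reverse := funext fun ans => funext fun k => inner ans k
  rw [hF, PySem.List.foldl_append_eq_flatMap, List.nil_append]

theorem modify_getD (bs : List (List Int)) (v : Int) (k0 k : Nat) (h : k0 < bs.length) :
    (bs.modify k0 (fun b => b ++ [v])).getD k [] = bs.getD k [] ++ (if k = k0 then [v] else []) := by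
  rw [List.getD_eq_getElem?_getD, List.getElem?_modify, List.getD_eq_getElem?_getD]
  by_cases hk : k = k0
  · subst hk
    cases hc : bs[k]? with
    | none => exact absurd (List.getElem?_eq_none_iff.mp hc) (by omega)
    | some b => simp
  · have : ¬ (k0 = k) := fun e => hk e.symm
    rw [if_neg hk, List.append_nil]
    cases bs[k]? <;> simp [this]

theorem inner_fill (row : List Int) :
    ∀ (bs : List (List Int)) (k0 : Nat), k0 + row.length ≤ bs.length →
      (row.foldl (fun st v => (st.1.modify st.2 (fun b => b ++ [v]), st.2 + 1)) (bs, k0)).1.length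
          = bs.length ∧
      ∀ k, (row.foldl (fun st v => (st.1.modify st.2 (fun b => b ++ [v]), st.2 + 1)) (bs, k0)).1.getD k []
          = bs.getD k [] ++ (if k0 ≤ k ∧ k - k0 < row.length then [row.getD (k - k0) 0] else []) := by
  induction row with
  | nil =>
    intro bs k0 _
    refine ⟨rfl, fun k => ?_⟩
    have hc : ¬ (k0 ≤ k ∧ k - k0 < ([] : List Int).length) := by
      simp only [List.length_nil]; omega
    rw [if_neg hc, List.append_nil]
    rfl
  | cons v row ih =>
    intro bs k0 hlen
    rw [List.foldl_cons]
    have hk0 : k0 < bs.length := by simp only [List.length_cons] at hlen; omega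
    have hlen' : (k0 + 1) + row.length ≤ (bs.modify k0 (fun b => b ++ [v])).length := by
      rw [List.length_modify]; simp only [List.length_cons] at hlen; omega
    obtain ⟨ihlen, ihget⟩ := ih (bs.modify k0 (fun b => b ++ [v])) (k0 + 1) hlen'
    refine ⟨by rw [ihlen, List.length_modify], fun k => ?_⟩
    rw [ihget k, modify_getD bs v k0 k hk0]
    by_cases hk : k = k0
    · subst hk
      have h1 : ¬ (k + 1 ≤ k ∧ k - (k + 1) < row.length) := by omega
      have h2 : k ≤ k ∧ k - k < (v :: row).length := by
        simp only [List.length_cons]; omega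
      rw [if_pos rfl, if_neg h1, if_pos h2, List.append_nil]
      simp
    · rw [if_neg hk, List.append_nil]
      by_cases h2 : k0 + 1 ≤ k ∧ k - (k0 + 1) < row.length
      · have h3 : k0 ≤ k ∧ k - k0 < (v :: row).length := by
          simp only [List.length_cons]; omega
        rw [if_pos h2, if_pos h3]
        have e : k - k0 = (k - (k0 + 1)) + 1 := by omega
        rw [e, List.getD_cons_succ]
      · have h3 : ¬ (k0 ≤ k ∧ k - k0 < (v :: row).length) := by
          simp only [List.length_cons]; omega
        rw [if_neg h2, if_neg h3]

theorem outer_fill :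
    ∀ (L : List (List Int × Nat)) (bs : List (List Int)), (∀ p ∈ L, p.2 + p.1.length ≤ bs.length) →
      (L.foldl (fun bs p =>
          (p.1.foldl (fun st v => (st.1.modify st.2 (fun b => b ++ [v]), st.2 + 1)) (bs, p.2)).1) bs).length
        = bs.length ∧
      ∀ k, (L.foldl (fun bs p =>
          (p.1.foldl (fun st v => (st.1.modify st.2 (fun b => b ++ [v]), st.2 + 1)) (bs, p.2)).1) bs).getD k []
        = bs.getD k [] ++ L.flatMap (fun p =>
            if p.2 ≤ k ∧ k - p.2 < p.1.length then [p.1.getD (k - p.2) 0] else []) := by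
  intro L
  induction L with
  | nil => intro bs _; exact ⟨rfl, fun k => by simp⟩
  | cons p L ih =>
    intro bs h
    rw [List.foldl_cons]
    obtain ⟨hlen, hget⟩ := inner_fill p.1 bs p.2 (h p (List.mem_cons_self ..))
    obtain ⟨ihlen, ihget⟩ := ih _ (fun p' hp' => by
      rw [hlen]; exact h p' (List.mem_cons_of_mem _ hp'))
    refine ⟨by rw [ihlen, hlen], fun k => ?_⟩
    rw [ihget k, hget k, List.flatMap_cons, List.append_assoc]

theorem dAt_eq_zipIdx (nums : List (List Int)) (k : Nat) :
    dAt nums k = nums.zipIdx.flatMap (fun p =>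
      if p.2 ≤ k ∧ k - p.2 < p.1.length then [p.1.getD (k - p.2) 0] else []) := by
  unfold dAt
  apply List.flatMap_congr
  intro p _
  have := rowpick p.1 p.2 k 0
  simpa using this

theorem foldl_max_le {α : Type} (f : α → Nat) (K : Nat) :
    ∀ (L : List α) (a : Nat), a ≤ K → (∀ p ∈ L, f p ≤ K) →
      L.foldl (fun n p => max n (f p)) a ≤ K := by
  intro L
  induction L with
  | nil => intro a h _; simpa using h
  | cons p L ih =>
    intro a h hp
    rw [List.foldl_cons]
    exact ih _ (by have := hp p (List.mem_cons_self ..); omega)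
      (fun p' hp' => hp p' (List.mem_cons_of_mem _ hp'))

theorem foldl_max_init_le {α : Type} (f : α → Nat) :
    ∀ (L : List α) (a : Nat), a ≤ L.foldl (fun n p => max n (f p)) a := by
  intro L
  induction L with
  | nil => intro a; exact le_rfl
  | cons q L ih =>
    intro a
    rw [List.foldl_cons]
    exact (le_max_left a (f q)).trans (ih (max a (f q)))

theorem le_foldl_max_mem {α : Type} (f : α → Nat) :
    ∀ (L : List α) (a : Nat) (p : α), p ∈ L → f p ≤ L.foldl (fun n p => max n (f p)) a := by
  intro L
  induction L with
  | nil => intro a p hp; cases hp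
  | cons q L ih =>
    intro a p hp
    rw [List.foldl_cons]
    rcases List.mem_cons.mp hp with h | h
    · subst h
      exact (le_max_right a (f p)).trans (foldl_max_init_le f L (max a (f p)))
    · exact ih _ p h

theorem self_eq_map_range_getD {α : Type} (d : α) (l : List α) :
    l = (List.range l.length).map (fun i => l.getD i d) := by
  induction l with
  | nil => simp
  | cons a l ih =>
    simp only [List.length_cons, List.range_succ_eq_map, List.map_cons, List.map_map,
      List.getD_cons_zero]
    refine congrArg₂ _ rfl ?_
    conv_lhs => rw [ih]
    apply List.map_congr_left
    intro i _
    simp [Nat.succ_eq_add_one]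

theorem replicate_getD (nd k : Nat) : (List.replicate nd ([] : List Int)).getD k [] = [] := by
  rw [List.getD_eq_getElem?_getD, List.getElem?_replicate]
  split_ifs <;> rfl

theorem B_eq_flatMap (nums : List (List Int)) :
    findDiagonalOrder4_alt nums
      = (List.range (nums.zipIdx.foldl (fun nd p => max nd (p.2 + p.1.length)) 0)).flatMap
          (fun k => (dAt nums k).reverse) := by
  simp only [findDiagonalOrder4_alt]
  rw [PySem.List.foldl_append_eq_flatMap List.reverse, List.nil_append]
  set nd := nums.zipIdx.foldl (fun nd p => max nd (p.2 + p.1.length)) 0 with hnd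
  have hbound : ∀ p ∈ nums.zipIdx, p.2 + p.1.length ≤ (List.replicate nd ([] : List Int)).length := by
    intro p hp
    rw [List.length_replicate, hnd]
    exact le_foldl_max_mem (fun p => p.2 + p.1.length) nums.zipIdx 0 p hp
  obtain ⟨hlen, hget⟩ := outer_fill nums.zipIdx (List.replicate nd []) hbound
  set bks := nums.zipIdx.foldl
    (fun bs p => (p.1.foldl (fun st v => (st.1.modify st.2 (fun b => b ++ [v]), st.2 + 1)) (bs, p.2)).1)
    (List.replicate nd []) with hbks
  conv_lhs => rw [self_eq_map_range_getD ([] : List Int) bks]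
  rw [List.flatMap_map, hlen, List.length_replicate]
  apply List.flatMap_congr
  intro k _
  rw [hget k, replicate_getD, List.nil_append, dAt_eq_zipIdx]

-- ===== VERDICT (by name: the statement is the Claim_ definition above) =====
theorem findDiagonalOrder4_spec : Claim_equal_findDiagonalOrder4 := by
  intro nums _ hpre
  unfold Spec_findDiagonalOrder4
  rw [A_eq_flatMap, B_eq_flatMap]
  set n := (PySem.List.max? ((List.range nums.length).map
    (fun i => (nums.getD i []).length)) (fun x => x)).getD 0 with hn
  set Ka := nums.length + n - 1 with hKa
  set nd := nums.zipIdx.foldl (fun nd p => max nd (p.2 + p.1.length)) 0 with hnd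
  clear_value n Ka nd
  -- every row length is at most n
  have hm : 1 ≤ nums.length := by
    cases nums with
    | nil => exact absurd rfl hpre
    | cons a l => simp
  have hmax : ∀ i, i < nums.length → (nums.getD i []).length ≤ n := by
    intro i hi
    cases hmx : PySem.List.max? ((List.range nums.length).map
        (fun i => (nums.getD i []).length)) (fun x => x) with
    | none =>
      rw [PySem.List.max?_eq_none_iff] at hmx
      simp [List.map_eq_nil_iff, List.range_eq_nil] at hmx
      exact absurd hmx hpre
    | some mx =>
      have hmem : (nums.getD i []).length ∈ (List.range nums.length).map
          (fun i => (nums.getD i []).length) :=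
        List.mem_map_of_mem (List.mem_range.mpr hi)
      have := PySem.List.max?_isMax hmx _ hmem
      simp only [hn, hmx, Option.getD_some]
      exact this
  -- every diagonal index reached by an element is below Ka
  have hrowbound : ∀ p ∈ nums.zipIdx, p.2 + p.1.length ≤ Ka := by
    rintro ⟨row, ip⟩ hp
    obtain ⟨-, hip, hrow⟩ := List.mem_zipIdx hp
    simp only [Nat.zero_add] at hip
    have hlen : row.length ≤ n := by
      have : nums.getD (ip - 0) [] = row := by
        rw [List.getD_eq_getElem _ _ (by omega), hrow]
      rw [← this]
      exact hmax _ (by omega)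
    simp only [hKa]
    omega
  -- the bucket count is no larger than Ka
  have hKb : nd ≤ Ka := by
    rw [hnd]
    exact foldl_max_le (fun p => p.2 + p.1.length) Ka nums.zipIdx 0 (by omega) hrowbound
  -- diagonals beyond the bucket count are empty
  have hzero : ∀ k, nd ≤ k → dAt nums k = [] := by
    intro k hk
    rw [dAt_eq_zipIdx, List.flatMap_eq_nil_iff]
    intro p hp
    have h1 : p.2 + p.1.length ≤ nd := by
      rw [hnd]
      exact le_foldl_max_mem (fun p => p.2 + p.1.length) nums.zipIdx 0 p hp
    rw [if_neg (by omega)]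
  rw [show Ka = nd + (Ka - nd) by omega, List.range_add, List.flatMap_append]
  have hnil : ((List.range (Ka - nd)).map (fun x => nd + x)).flatMap
      (fun k => (dAt nums k).reverse) = [] := by
    rw [List.flatMap_eq_nil_iff]
    intro x hx
    obtain ⟨y, -, rfl⟩ := List.mem_map.mp hx
    rw [hzero _ (by omega)]
    rfl
  rw [hnil, List.append_nil]
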